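-- pv_equiv track=rewrite | github.com/Sarthak67/leisure_coding | Max_commanality.py | commonality
-- ===== SOURCE A (Python) =====
-- import collections
--
-- def commonality(s):
-- 	out=0
-- 	c1=collections.Counter(' ')
-- 	c2=collections.Counter(s)
-- 	for i,c in enumerate(s):
-- 		c1[c]+=1
-- 		c2[c]-=1
-- 		out=max(out,sum((c1&c2).values()))
--
--
-- 	return out
-- ===== SOURCE B (Python) =====
-- def commonality(s):
--     # Incremental O(n + k): keep the running intersection sum and update only
--     # the moved character's min-contribution.  Starts from the same initial
--     # counters as the original (prefix counter seeded with one space).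
--     suff = {}
--     for c in s:
--         suff[c] = suff.get(c, 0) + 1
--     pref = {' ': 1}
--     total = min(1, suff.get(' ', 0))
--     out = 0
--     for c in s:
--         p = pref.get(c, 0)
--         q = suff[c]
--         total += min(p + 1, q - 1) - min(p, q)
--         pref[c] = p + 1
--         suff[c] = q - 1
--         if total > out:
--             out = total
--     return out
-- ===== Notes on version B (the rewrite author's own statement) =====
-- stated objective: faster
-- what changed: Instead of recomputing the whole Counter-intersection sum at every position (a scan over all distinct characters per step), B precomputes the suffix counts once and updates a running intersection sum by the moved character's change of min-contribution only.
import Mathlib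
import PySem

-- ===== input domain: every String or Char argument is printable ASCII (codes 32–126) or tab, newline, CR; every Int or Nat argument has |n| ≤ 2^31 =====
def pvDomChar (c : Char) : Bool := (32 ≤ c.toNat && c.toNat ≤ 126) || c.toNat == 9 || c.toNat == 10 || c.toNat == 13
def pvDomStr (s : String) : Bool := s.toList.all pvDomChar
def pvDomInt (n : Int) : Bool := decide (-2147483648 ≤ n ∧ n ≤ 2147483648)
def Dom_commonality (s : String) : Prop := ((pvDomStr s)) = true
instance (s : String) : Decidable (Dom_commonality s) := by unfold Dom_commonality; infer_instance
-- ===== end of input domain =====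

-- B replaces A's per-position rescan of the whole Counter intersection by a running
-- intersection sum updated incrementally per character (objective: faster).


-- ===== PORT A =====
-- sum((c1 & c2).values()): Counter.__and__ keeps min(count, other_count) when positive
def pvInterSum (c1 c2 : PySem.Dict Char Int) : Int :=
  c1.items.foldl (fun acc kv =>
    acc + (if 0 < min kv.2 (c2.getD kv.1 0) then min kv.2 (c2.getD kv.1 0) else 0)) 0

def pvStepA (st : Int × PySem.Dict Char Int × PySem.Dict Char Int) (c : Char) :
    Int × PySem.Dict Char Int × PySem.Dict Char Int :=
  let c1 := st.2.1.modify c 0 (· + 1)       -- c1[c] += 1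
  let c2 := st.2.2.modify c 0 (· - 1)       -- c2[c] -= 1
  (max st.1 (pvInterSum c1 c2), c1, c2)     -- out = max(out, sum((c1&c2).values()))

def commonality (s : String) : Int :=
  (s.toList.foldl pvStepA (0, PySem.Dict.counter [' '], PySem.Dict.counter s.toList)).1

-- ===== PORT B =====
-- q := suff.getD c 0 ports Python's suff[c]: the key is always present (suff was built
-- from s and values of present characters never drop below the remaining count), so
-- Python's B never raises KeyError.
def pvStepB (st : Int × Int × PySem.Dict Char Int × PySem.Dict Char Int) (c : Char) :
    Int × Int × PySem.Dict Char Int × PySem.Dict Char Int :=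
  let p := st.2.2.1.getD c 0
  let q := st.2.2.2.getD c 0
  let total := st.2.1 + (min (p + 1) (q - 1) - min p q)
  ((if total > st.1 then total else st.1), total,
    st.2.2.1.insert c (p + 1), st.2.2.2.insert c (q - 1))

def commonality_alt (s : String) : Int :=
  let suff := s.toList.foldl (fun d c => d.insert c (d.getD c 0 + 1)) PySem.Dict.empty
  let pref : PySem.Dict Char Int := (PySem.Dict.empty).insert ' ' 1
  let total := min 1 (suff.getD ' ' 0)
  (s.toList.foldl pvStepB (0, total, pref, suff)).1

-- ===== PRECONDITION & SPEC =====
def Spec_commonality (s : String) (out : Int) : Prop := out = commonality_alt s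
instance (s : String) (out : Int) : Decidable (Spec_commonality s out) := by unfold Spec_commonality; infer_instance

-- ===== CLAIM (what is proved, stated in full; the proofs are below) =====
def Claim_equal_commonality : Prop := ∀ (s : String), Dom_commonality s → Spec_commonality s (commonality s)

-- ===== LEMMAS AND PROOFS =====

theorem pv_foldl_add_int {α : Type} (l : List α) (f : α → Int) (a : Int) :
    l.foldl (fun acc x => acc + f x) a = a + (l.map f).sum := by
  induction l generalizing a with
  | nil => simp
  | cons x t ih => simp [List.foldl_cons, ih, add_assoc]

-- pvInterSum as a sum over c1.keys
theorem pv_interSum_keys (c1 c2 : PySem.Dict Char Int) (hnd : c1.keys.Nodup) :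
    pvInterSum c1 c2 =
      (c1.keys.map (fun k =>
        if 0 < min (c1.getD k 0) (c2.getD k 0) then min (c1.getD k 0) (c2.getD k 0) else 0)).sum := by
  unfold pvInterSum
  rw [pv_foldl_add_int, PySem.Dict.items_eq_map_keys c1 hnd 0]
  simp [List.map_map, Function.comp_def]

theorem pv_posmin (a b : Int) (ha : 0 ≤ a) (hb : 0 ≤ b) :
    (if 0 < min a b then min a b else 0) = min a b := by
  split <;> omega

theorem pv_sum_replace (L : List Char) (c : Char) (f g : Char → Int)
    (hn : L.Nodup) (hc : c ∈ L) (h : ∀ k ∈ L, k ≠ c → f k = g k) :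
    (L.map f).sum = (L.map g).sum + (f c - g c) := by
  induction L with
  | nil => cases hc
  | cons x t ih =>
    rcases List.mem_cons.mp hc with hx | ht
    · subst hx
      have : ∀ k ∈ t, f k = g k := by
        intro k hk
        exact h k (List.mem_cons_of_mem _ hk) (fun he => (List.nodup_cons.mp hn).1 (he ▸ hk))
      simp [List.map_congr_left this]; ring
    · have hxc : x ≠ c := fun he => (List.nodup_cons.mp hn).1 (he ▸ ht)
      have := ih (List.nodup_cons.mp hn).2 ht (fun k hk hkc => h k (List.mem_cons_of_mem _ hk) hkc)
      simp only [List.map_cons, List.sum_cons, this, h x (List.mem_cons_self) hxc]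
      ring

theorem pv_interSum_insert (c1 c2 : PySem.Dict Char Int) (c : Char)
    (hnd : c1.keys.Nodup)
    (h1 : ∀ k, 0 ≤ c1.getD k 0) (h2 : ∀ k, 0 ≤ c2.getD k 0)
    (hq : 1 ≤ c2.getD c 0) :
    pvInterSum (c1.insert c (c1.getD c 0 + 1)) (c2.insert c (c2.getD c 0 - 1)) =
      pvInterSum c1 c2 +
        (min (c1.getD c 0 + 1) (c2.getD c 0 - 1) - min (c1.getD c 0) (c2.getD c 0)) := by
  set p := c1.getD c 0 with hp
  set q := c2.getD c 0 with hqd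
  have hnd' : (c1.insert c (p + 1)).keys.Nodup := PySem.Dict.nodup_keys_insert c1 c (p + 1) hnd
  rw [pv_interSum_keys _ _ hnd', pv_interSum_keys _ _ hnd]
  by_cases hcon : c1.contains c = true
  · have hkeys : (c1.insert c (p + 1)).keys = c1.keys := PySem.Dict.keys_insert_of_contains c1 (p + 1) hcon
    have hmem : c ∈ c1.keys := (PySem.Dict.contains_iff_mem_keys c1 c).mp hcon
    have hrepl := pv_sum_replace c1.keys c
      (fun k => if 0 < min ((c1.insert c (p + 1)).getD k 0) ((c2.insert c (q - 1)).getD k 0)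
        then min ((c1.insert c (p + 1)).getD k 0) ((c2.insert c (q - 1)).getD k 0) else 0)
      (fun k => if 0 < min (c1.getD k 0) (c2.getD k 0) then min (c1.getD k 0) (c2.getD k 0) else 0)
      hnd hmem ?_
    · rw [hkeys, hrepl]
      have e1 : (c1.insert c (p + 1)).getD c 0 = p + 1 := PySem.Dict.getD_insert_self c1 c (p + 1) 0
      have e2 : (c2.insert c (q - 1)).getD c 0 = q - 1 := PySem.Dict.getD_insert_self c2 c (q - 1) 0
      simp only [e1, e2]
      rw [pv_posmin _ _ (by have := h1 c; omega) (by omega),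
          pv_posmin _ _ (h1 c) (h2 c)]
    · intro k hk hkc
      simp only
      rw [PySem.Dict.getD_insert_of_ne c1 (p + 1) 0 hkc,
          PySem.Dict.getD_insert_of_ne c2 (q - 1) 0 hkc]
  · have hcon' : c1.contains c = false := by simpa using hcon
    have hp0 : p = 0 := by rw [hp]; exact PySem.Dict.getD_of_not_contains c1 0 hcon'
    have hkeys : (c1.insert c (p + 1)).keys = c1.keys ++ [c] :=
      PySem.Dict.keys_insert_of_not_contains c1 (p + 1) hcon'
    rw [hkeys, List.map_append, List.sum_append]
    have hnotmem : c ∉ c1.keys := fun hm => by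
      rw [(PySem.Dict.contains_iff_mem_keys c1 c).mpr hm] at hcon'; cases hcon'
    have heach : ∀ k ∈ c1.keys,
        (if 0 < min ((c1.insert c (p + 1)).getD k 0) ((c2.insert c (q - 1)).getD k 0)
         then min ((c1.insert c (p + 1)).getD k 0) ((c2.insert c (q - 1)).getD k 0) else 0)
        = (if 0 < min (c1.getD k 0) (c2.getD k 0) then min (c1.getD k 0) (c2.getD k 0) else 0) := by
      intro k hk
      have hkc : k ≠ c := fun he => hnotmem (he ▸ hk)
      rw [PySem.Dict.getD_insert_of_ne c1 (p + 1) 0 hkc,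
          PySem.Dict.getD_insert_of_ne c2 (q - 1) 0 hkc]
    rw [List.map_congr_left heach]
    have e1 : (c1.insert c (p + 1)).getD c 0 = p + 1 := PySem.Dict.getD_insert_self c1 c (p + 1) 0
    have e2 : (c2.insert c (q - 1)).getD c 0 = q - 1 := PySem.Dict.getD_insert_self c2 c (q - 1) 0
    simp only [List.map_cons, List.map_nil, List.sum_cons, List.sum_nil, e1, e2]
    rw [pv_posmin _ _ (by omega) (by omega)]
    omega

theorem pv_modify_eq_insert (d : PySem.Dict Char Int) (c : Char) (f : Int → Int) :
    d.modify c 0 f = d.insert c (f (d.getD c 0)) := by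
  simp [PySem.Dict.modify, PySem.Dict.insert, PySem.Dict.getD]

theorem pv_max_eq_if (a b : Int) : max a b = if b > a then b else a := by
  split <;> omega

theorem commonality_loop_eq :
    ∀ (l : List Char) (out total : Int) (c1 c2 : PySem.Dict Char Int),
      c1.keys.Nodup →
      (∀ k, 0 ≤ c1.getD k 0) →
      (∀ k, (l.count k : Int) ≤ c2.getD k 0) →
      (∀ k, 0 ≤ c2.getD k 0) →
      total = pvInterSum c1 c2 →
      (l.foldl pvStepA (out, c1, c2)).1 = (l.foldl pvStepB (out, total, c1, c2)).1 := by
  intro l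
  induction l with
  | nil => intro out total c1 c2 _ _ _ _ ht; simp [ht]
  | cons c t ih =>
    intro out total c1 c2 hnd h1 hcnt h2 ht
    have hq1 : 1 ≤ c2.getD c 0 := by
      have h := hcnt c
      simp only [List.count_cons_self] at h
      push_cast at h
      omega
    simp only [List.foldl_cons, pvStepA, pvStepB]
    rw [pv_modify_eq_insert, pv_modify_eq_insert]
    have hdelta := pv_interSum_insert c1 c2 c hnd h1 h2 hq1
    have htot' : total + (min (c1.getD c 0 + 1) (c2.getD c 0 - 1) - min (c1.getD c 0) (c2.getD c 0))
        = pvInterSum (c1.insert c (c1.getD c 0 + 1)) (c2.insert c (c2.getD c 0 - 1)) := by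
      rw [hdelta, ht]
    rw [ih (max out (pvInterSum (c1.insert c (c1.getD c 0 + 1)) (c2.insert c (c2.getD c 0 - 1)))) _
        (c1.insert c (c1.getD c 0 + 1)) (c2.insert c (c2.getD c 0 - 1))
        (PySem.Dict.nodup_keys_insert c1 c _ hnd) ?_ ?_ ?_ htot']
    · rw [← htot', pv_max_eq_if, ht]
    · intro k
      rw [PySem.Dict.getD_insert]
      split
      · have := h1 c; omega
      · exact h1 k
    · intro k
      rw [PySem.Dict.getD_insert]
      have h := hcnt k
      simp only [List.count_cons] at h
      push_cast at h
      by_cases hkc : k = c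
      · subst hkc
        rw [if_pos rfl]
        simp at h
        omega
      · rw [if_neg hkc]
        rw [if_neg (by simpa using Ne.symm hkc)] at h
        omega
    · intro k
      rw [PySem.Dict.getD_insert]
      split
      · omega
      · exact h2 k

theorem pv_counter_space : (PySem.Dict.counter [' '] : PySem.Dict Char Int) = PySem.Dict.mk [(' ', 1)] := by
  decide

theorem pv_interSum_init (c2 : PySem.Dict Char Int) (h : 0 ≤ c2.getD ' ' 0) :
    pvInterSum (PySem.Dict.counter [' ']) c2 = min 1 (c2.getD ' ' 0) := by
  rw [pv_counter_space]
  simp only [pvInterSum, List.foldl_cons, List.foldl_nil, zero_add]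
  rw [pv_posmin _ _ (by omega) h]

theorem pv_pref_eq : (PySem.Dict.empty : PySem.Dict Char Int).insert ' ' 1 = PySem.Dict.counter [' '] := by
  decide

-- ===== VERDICT (by name: the statement is the Claim_ definition above) =====
theorem commonality_spec : Claim_equal_commonality := by
  intro s _
  unfold Spec_commonality commonality commonality_alt
  rw [PySem.Dict.foldl_insert_getD_add_one_eq_counter]
  show (List.foldl pvStepA (0, PySem.Dict.counter [' '], PySem.Dict.counter s.toList) s.toList).1 =
    (List.foldl pvStepB (0, min 1 ((PySem.Dict.counter s.toList).getD ' ' 0),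
      PySem.Dict.empty.insert ' ' 1, PySem.Dict.counter s.toList) s.toList).1
  rw [pv_pref_eq]
  refine commonality_loop_eq s.toList 0 _ _ _ ?_ ?_ ?_ ?_ ?_
  · rw [pv_counter_space]; decide
  · intro k
    rw [PySem.Dict.getD_counter]; positivity
  · intro k
    rw [PySem.Dict.getD_counter]
  · intro k
    rw [PySem.Dict.getD_counter]; positivity
  · rw [pv_interSum_init (PySem.Dict.counter s.toList)
      (by rw [PySem.Dict.getD_counter]; positivity)]
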